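-- pv_equiv track=rewrite | github.com/sansqrit/sansqritpip | src/sansqrit/dsl.py | _replace_words_outside_strings
-- ===== SOURCE A (Python) =====
-- def _replace_words_outside_strings(line: str) -> str:
--     # Lightweight replacements for DSL literals.
--     out = []
--     i = 0
--     in_str: str | None = None
--     while i < len(line):
--         ch = line[i]
--         if in_str:
--             out.append(ch)
--             if ch == "\\" and i + 1 < len(line):
--                 i += 1; out.append(line[i])
--             elif ch == in_str:
--                 in_str = None
--             i += 1
--             continue
--         if ch in {'"', "'"}:
--             in_str = ch
--             out.append(ch); i += 1; continue
--         if line.startswith("true", i) and (i == 0 or not line[i-1].isalnum()) and (i+4 == len(line) or not line[i+4].isalnum()):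
--             out.append("True"); i += 4; continue
--         if line.startswith("false", i) and (i == 0 or not line[i-1].isalnum()) and (i+5 == len(line) or not line[i+5].isalnum()):
--             out.append("False"); i += 5; continue
--         if line.startswith("null", i) and (i == 0 or not line[i-1].isalnum()) and (i+4 == len(line) or not line[i+4].isalnum()):
--             out.append("None"); i += 4; continue
--         out.append(ch); i += 1
--     return "".join(out)
-- ===== SOURCE B (Python) =====
-- _KEYWORDS = {"true": "True", "false": "False", "null": "None"}
--
-- def _replace_words_outside_strings(line: str) -> str:
--     # Segment scanner: copy quoted string literals wholesale, map maximal
--     # alphanumeric runs through a keyword table, copy everything else.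
--     out = []
--     i = 0
--     n = len(line)
--     while i < n:
--         ch = line[i]
--         if ch == '"' or ch == "'":
--             j = i + 1
--             while j < n:
--                 if line[j] == "\\" and j + 1 < n:
--                     j += 2
--                 elif line[j] == ch:
--                     j += 1
--                     break
--                 else:
--                     j += 1
--             out.append(line[i:j])
--             i = j
--         elif ch.isalnum():
--             j = i
--             while j < n and line[j].isalnum():
--                 j += 1
--             word = line[i:j]
--             out.append(_KEYWORDS.get(word, word))
--             i = j
--         else:
--             out.append(ch)
--             i += 1
--     return "".join(out)
-- ===== Notes on version B (the rewrite author's own statement) =====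
-- stated objective: faster
-- what changed: Replaces A's character-at-a-time loop with an in-string flag and per-position keyword/boundary tests by a segment scanner: quoted string literals are skipped wholesale by an inner scanner, maximal alphanumeric runs are sliced out and mapped through a keyword table (true/false/null), everything else is copied.
import Mathlib
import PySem

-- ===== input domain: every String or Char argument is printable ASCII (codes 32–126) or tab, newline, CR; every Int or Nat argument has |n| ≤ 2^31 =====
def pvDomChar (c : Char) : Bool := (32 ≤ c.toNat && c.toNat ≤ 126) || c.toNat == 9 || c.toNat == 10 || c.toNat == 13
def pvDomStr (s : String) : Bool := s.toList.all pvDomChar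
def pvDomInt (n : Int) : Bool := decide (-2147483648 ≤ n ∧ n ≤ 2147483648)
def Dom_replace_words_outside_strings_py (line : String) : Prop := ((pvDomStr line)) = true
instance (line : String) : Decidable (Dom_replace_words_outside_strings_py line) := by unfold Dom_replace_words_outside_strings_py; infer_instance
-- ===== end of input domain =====

-- B replaces A's in-string flag state machine (per-position keyword/boundary
-- tests) by a segment scanner: quoted literals copied wholesale, maximal alnum
-- runs sliced out and mapped through a keyword table; same O(n), measurably
-- faster by constant factor (fewer per-character tests, bulk slice copies).

-- Python str.isalnum, exact for the printable-ASCII domain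
def pyIsAlnum (c : Char) : Bool := c.isAlphanum

-- ===== PORT A =====
-- A's while loop: index i, in-string flag, accumulator out
def aLoop (cs : List Char) (i : Nat) (instr : Option Char) (out : List Char) : List Char :=
  if _h : i < cs.length then
    let ch := cs.getD i ' '
    match instr with
    | some q =>
      let out1 := out ++ [ch]
      if ch = '\\' ∧ i + 1 < cs.length then
        aLoop cs (i + 2) (some q) (out1 ++ [cs.getD (i + 1) ' '])
      else if ch = q then aLoop cs (i + 1) none out1
      else aLoop cs (i + 1) (some q) out1
    | none =>
      if ch = '"' ∨ ch = '\'' then aLoop cs (i + 1) (some ch) (out ++ [ch])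
      else if (cs.drop i).take 4 = "true".toList ∧ (i = 0 ∨ ¬ pyIsAlnum (cs.getD (i - 1) ' ')) ∧
              (i + 4 = cs.length ∨ ¬ pyIsAlnum (cs.getD (i + 4) ' ')) then
        aLoop cs (i + 4) none (out ++ "True".toList)
      else if (cs.drop i).take 5 = "false".toList ∧ (i = 0 ∨ ¬ pyIsAlnum (cs.getD (i - 1) ' ')) ∧
              (i + 5 = cs.length ∨ ¬ pyIsAlnum (cs.getD (i + 5) ' ')) then
        aLoop cs (i + 5) none (out ++ "False".toList)
      else if (cs.drop i).take 4 = "null".toList ∧ (i = 0 ∨ ¬ pyIsAlnum (cs.getD (i - 1) ' ')) ∧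
              (i + 4 = cs.length ∨ ¬ pyIsAlnum (cs.getD (i + 4) ' ')) then
        aLoop cs (i + 4) none (out ++ "None".toList)
      else aLoop cs (i + 1) none (out ++ [ch])
  else out
termination_by cs.length - i

def replace_words_outside_strings_py (line : String) : String :=
  String.mk (aLoop line.toList 0 none [])

-- ===== PORT B =====
-- B's inner while loop scanning past a quoted literal (returns the index after it)
def bScanStr (cs : List Char) (q : Char) (j : Nat) : Nat :=
  if _h : j < cs.length then
    if cs.getD j ' ' = '\\' ∧ j + 1 < cs.length then bScanStr cs q (j + 2)
    else if cs.getD j ' ' = q then j + 1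
    else bScanStr cs q (j + 1)
  else j
termination_by cs.length - j

theorem bScanStr_ge (cs : List Char) (q : Char) (j : Nat) : j ≤ bScanStr cs q j := by
  fun_induction bScanStr <;> omega

-- B's inner while loop scanning a maximal alphanumeric run (returns its end)
def bRunEnd (cs : List Char) (j : Nat) : Nat :=
  if _h : j < cs.length then
    if pyIsAlnum (cs.getD j ' ') then bRunEnd cs (j + 1) else j
  else j
termination_by cs.length - j

theorem bRunEnd_ge (cs : List Char) (j : Nat) : j ≤ bRunEnd cs j := by
  fun_induction bRunEnd <;> omega

theorem bRunEnd_gt (cs : List Char) (j : Nat) (h1 : j < cs.length)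
    (h2 : pyIsAlnum (cs.getD j ' ') = true) : j < bRunEnd cs j := by
  rw [bRunEnd, dif_pos h1, if_pos h2]
  have := bRunEnd_ge cs (j + 1); omega

-- the _KEYWORDS.get lookup
def keyMap (w : List Char) : List Char :=
  if w = "true".toList then "True".toList
  else if w = "false".toList then "False".toList
  else if w = "null".toList then "None".toList
  else w

def bLoop (cs : List Char) (i : Nat) (out : List Char) : List Char :=
  if hlt : i < cs.length then
    let ch := cs.getD i ' '
    if ch = '"' ∨ ch = '\'' then
      let j := bScanStr cs ch (i + 1)
      bLoop cs j (out ++ (cs.drop i).take (j - i))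
    else if pyIsAlnum ch then
      let j := bRunEnd cs i
      bLoop cs j (out ++ keyMap ((cs.drop i).take (j - i)))
    else bLoop cs (i + 1) (out ++ [ch])
  else out
termination_by cs.length - i
decreasing_by
  · have := bScanStr_ge cs (cs.getD i ' ') (i + 1); omega
  · have := bRunEnd_gt cs i hlt (by assumption); omega
  · omega

def replace_words_outside_strings_py_alt (line : String) : String :=
  String.mk (bLoop line.toList 0 [])

-- ===== PRECONDITION & SPEC =====
def Spec_replace_words_outside_strings_py (line : String) (out : String) : Prop := out = replace_words_outside_strings_py_alt line
instance (line : String) (out : String) : Decidable (Spec_replace_words_outside_strings_py line out) := by unfold Spec_replace_words_outside_strings_py; infer_instance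

-- ===== CLAIM (what is proved, stated in full; the proofs are below) =====
def Claim_equal_replace_words_outside_strings_py : Prop := ∀ (line : String), Dom_replace_words_outside_strings_py line → Spec_replace_words_outside_strings_py line (replace_words_outside_strings_py line)

-- ===== LEMMAS AND PROOFS =====

-- slice algebra: peel the first character of a slice
theorem slice_cons (cs : List Char) (k j : Nat) (hk : k < cs.length) (hkj : k < j) :
    (cs.drop k).take (j - k) = cs.getD k ' ' :: (cs.drop (k + 1)).take (j - (k + 1)) := by
  rw [List.drop_eq_getElem_cons hk]
  have h : j - k = (j - (k + 1)) + 1 := by omega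
  rw [h, List.take_succ_cons, List.getD_eq_getElem cs ' ' hk]

-- a slice equal to a word pins down the characters and the length bound
theorem slice_getD (cs : List Char) (i n m : Nat) (w : List Char) (d : Char)
    (hw : (cs.drop i).take n = w) (hm : m < w.length) :
    cs.getD (i + m) d = w.getD m d := by
  have h1 : w[m]? = cs[i + m]? := by
    rw [← hw, List.getElem?_take, List.getElem?_drop]
    have h2 : m < n := by subst hw; simp at hm; omega
    simp [h2]
  simp [List.getD_eq_getElem?_getD, h1]

theorem slice_len (cs : List Char) (i n : Nat) (w : List Char)
    (hw : (cs.drop i).take n = w) : w.length = min n (cs.length - i) := by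
  subst hw; simp

theorem bScanStr_le (cs : List Char) (q : Char) (k : Nat) (h : k ≤ cs.length) :
    bScanStr cs q k ≤ cs.length := by
  fun_induction bScanStr <;> omega

theorem bScanStr_boundary (cs : List Char) (q : Char) (k : Nat) (h : k ≤ cs.length) :
    bScanStr cs q k = cs.length ∨
      (0 < bScanStr cs q k ∧ cs.getD (bScanStr cs q k - 1) ' ' = q) := by
  fun_induction bScanStr with
  | case1 j hj hb ih => exact ih (by omega)
  | case2 j hj hb hq => right; simpa using hq
  | case3 j hj hb hq ih => exact ih (by omega)
  | case4 j hj => omega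

-- A's in-string loop copies exactly the segment B's string scanner delimits
theorem strL (cs : List Char) (q : Char) (k : Nat) : ∀ out : List Char,
    aLoop cs k (some q) out =
      aLoop cs (bScanStr cs q k) none (out ++ (cs.drop k).take (bScanStr cs q k - k)) := by
  fun_induction bScanStr cs q k with
  | case1 j hj hb ih =>
    intro out
    rw [aLoop.eq_def]
    simp only [dif_pos hj, hb, and_true, if_pos]
    rw [ih]
    have hS : j + 2 ≤ bScanStr cs q (j + 2) := bScanStr_ge cs q (j + 2)
    rw [slice_cons cs j _ hj (by omega), slice_cons cs (j + 1) _ hb.2 (by omega)]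
    have hb1 : cs[j]?.getD ' ' = '\\' := by
      simpa [List.getD_eq_getElem?_getD] using hb.1
    simp [hb1, show j + 1 + 1 = j + 2 from rfl]
  | case2 j hj hb hq =>
    intro out
    rw [aLoop.eq_def]
    simp only [dif_pos hj, if_neg hb, if_pos hq]
    rw [slice_cons cs j _ hj (by omega)]
    have hq1 : cs[j]?.getD ' ' = q := by
      simpa [List.getD_eq_getElem?_getD] using hq
    simp [hq1]
  | case3 j hj hb hq ih =>
    intro out
    rw [aLoop.eq_def]
    simp only [dif_pos hj, if_neg hb, if_neg hq]
    rw [ih]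
    have hS : j + 1 ≤ bScanStr cs q (j + 1) := bScanStr_ge cs q (j + 1)
    rw [slice_cons cs j _ hj (by omega)]
    simp
  | case4 j hj =>
    intro out
    rw [aLoop.eq_def]
    simp only [dif_neg hj]
    rw [aLoop.eq_def]
    simp [dif_neg hj]

theorem bRunEnd_le (cs : List Char) (k : Nat) (h : k ≤ cs.length) :
    bRunEnd cs k ≤ cs.length := by
  fun_induction bRunEnd <;> omega

theorem bRunEnd_stop (cs : List Char) (k : Nat) (h : k ≤ cs.length) :
    bRunEnd cs k = cs.length ∨ pyIsAlnum (cs.getD (bRunEnd cs k) ' ') = false := by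
  fun_induction bRunEnd with
  | case1 j hj ha ih => exact ih (by omega)
  | case2 j hj ha => right; simpa using ha
  | case3 j hj => left; omega

theorem bRunEnd_succ (cs : List Char) (k : Nat) (h1 : k < cs.length)
    (h2 : pyIsAlnum (cs.getD k ' ') = true) : bRunEnd cs k = bRunEnd cs (k + 1) := by
  rw [bRunEnd, dif_pos h1, if_pos h2]

theorem bRunEnd_eq (cs : List Char) (k j : Nat) (hkj : k ≤ j) (hj : j ≤ cs.length)
    (hall : ∀ m, k ≤ m → m < j → pyIsAlnum (cs.getD m ' ') = true)
    (hstop : j = cs.length ∨ pyIsAlnum (cs.getD j ' ') = false) :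
    bRunEnd cs k = j := by
  rw [bRunEnd]
  by_cases hk : k < cs.length
  · rw [dif_pos hk]
    by_cases ha : pyIsAlnum (cs.getD k ' ') = true
    · rw [if_pos ha]
      have hlt : k < j := by
        rcases Nat.eq_or_lt_of_le hkj with h | h
        · exfalso; rcases hstop with h2 | h2
          · omega
          · rw [← h] at h2; rw [h2] at ha; exact Bool.false_ne_true ha
        · exact h
      exact bRunEnd_eq cs (k + 1) j hlt hj (fun m hm1 hm2 => hall m (by omega) hm2) hstop
    · rw [if_neg ha]
      rcases Nat.eq_or_lt_of_le hkj with h | h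
      · exact h
      · exact absurd (hall k (le_refl k) h) ha
  · rw [dif_neg hk]; omega
termination_by j - k

-- mid-run, A copies the rest of the alphanumeric run verbatim
theorem copyRun (cs : List Char) (m : Nat) (h1 : 1 ≤ m)
    (h2 : pyIsAlnum (cs.getD (m - 1) ' ') = true) : ∀ out : List Char,
    aLoop cs m none out =
      aLoop cs (bRunEnd cs m) none (out ++ (cs.drop m).take (bRunEnd cs m - m)) := by
  intro out
  by_cases hm : m < cs.length
  · by_cases ha : pyIsAlnum (cs.getD m ' ') = true
    · rw [bRunEnd_succ cs m hm ha]
      rw [aLoop.eq_def]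
      simp only [dif_pos hm]
      have hnq : ¬(cs.getD m ' ' = '"' ∨ cs.getD m ' ' = '\'') := by
        rintro (h | h) <;> rw [h] at ha <;> exact absurd ha (by decide)
      have hbnd : ¬(m = 0 ∨ ¬(pyIsAlnum (cs.getD (m - 1) ' ') = true)) := by
        rintro (h0 | hp)
        · omega
        · exact hp h2
      rw [if_neg hnq, if_neg (fun hc => hbnd hc.2.1), if_neg (fun hc => hbnd hc.2.1),
        if_neg (fun hc => hbnd hc.2.1)]
      rw [copyRun cs (m + 1) (by omega) (by simpa using ha)]
      have hS := bRunEnd_ge cs (m + 1)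
      rw [slice_cons cs m _ hm (by omega)]
      simp
    · have h0 : bRunEnd cs m = m := by rw [bRunEnd, dif_pos hm, if_neg ha]
      rw [h0]; simp
  · have h0 : bRunEnd cs m = m := by rw [bRunEnd, dif_neg hm]
    rw [h0]; simp
termination_by cs.length - m

-- position i is a word boundary for A (start of line, after a non-alnum char,
-- or not itself alphanumeric)
def GoodB (cs : List Char) (i : Nat) : Prop :=
  i = 0 ∨ pyIsAlnum (cs.getD (i - 1) ' ') = false ∨ cs.length ≤ i ∨
    pyIsAlnum (cs.getD i ' ') = false

-- characters of a keyword slice are alphanumeric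
theorem kw_alnum (cs : List Char) (i k : Nat) (w : List Char)
    (hA : (cs.drop i).take k = w) (hw : ∀ m, (hm : m < w.length) → pyIsAlnum (w.getD m ' ') = true) :
    ∀ m, i ≤ m → m < i + w.length → pyIsAlnum (cs.getD m ' ') = true := by
  intro m hm1 hm2
  have h := slice_getD cs i k (m - i) w ' ' hA (by omega)
  rw [show i + (m - i) = m by omega] at h
  rw [h]
  exact hw (m - i) (by omega)

-- A's keyword condition forces B's run to be exactly that keyword
theorem kw_run (cs : List Char) (i : Nat) (w : List Char) (hwne : w ≠ [])
    (hw : ∀ m, (hm : m < w.length) → pyIsAlnum (w.getD m ' ') = true)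
    (hA : (cs.drop i).take w.length = w)
    (hB : i + w.length = cs.length ∨ ¬(pyIsAlnum (cs.getD (i + w.length) ' ') = true)) :
    bRunEnd cs i = i + w.length := by
  have hlen := slice_len cs i w.length w hA
  have hpos : w.length ≠ 0 := by simpa using hwne
  have hle : i + w.length ≤ cs.length := by omega
  exact bRunEnd_eq cs i (i + w.length) (by omega) hle
    (kw_alnum cs i w.length w hA hw)
    (by rcases hB with h | h
        · left; exact h
        · right; simpa using h)

theorem mainL (cs : List Char) : ∀ n i out, cs.length - i ≤ n → i ≤ cs.length →
    GoodB cs i → aLoop cs i none out = bLoop cs i out := by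
  intro n
  induction n with
  | zero =>
    intro i out hn hi hg
    rw [aLoop.eq_def]
    simp only [dif_neg (by omega : ¬ i < cs.length)]
    rw [bLoop.eq_def]
    simp only [dif_neg (by omega : ¬ i < cs.length)]
  | succ n ih =>
    intro i out hn hi hg
    by_cases him : i < cs.length
    · by_cases hq : cs.getD i ' ' = '"' ∨ cs.getD i ' ' = '\''
      · -- a quoted string literal starts here
        rw [aLoop.eq_def]
        simp only [dif_pos him, if_pos hq]
        rw [strL]
        rw [bLoop.eq_def]
        simp only [dif_pos him, if_pos hq]
        have hge : i + 1 ≤ bScanStr cs (cs.getD i ' ') (i + 1) := bScanStr_ge cs _ (i + 1)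
        have hle : bScanStr cs (cs.getD i ' ') (i + 1) ≤ cs.length :=
          bScanStr_le cs _ (i + 1) (by omega)
        have hgd : GoodB cs (bScanStr cs (cs.getD i ' ') (i + 1)) := by
          rcases bScanStr_boundary cs (cs.getD i ' ') (i + 1) (by omega) with h | ⟨h0, hqe⟩
          · right; right; left; omega
          · right; left
            rw [hqe]
            rcases hq with h | h <;> rw [h] <;> decide
        rw [ih _ _ (by omega) hle hgd]
        rw [slice_cons cs i _ him (by omega)]
        congr 1
        simp
      · by_cases ha : pyIsAlnum (cs.getD i ' ') = true
        · -- an alphanumeric run starts here (GoodB: a word boundary)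
          have hprev : i = 0 ∨ ¬(pyIsAlnum (cs.getD (i - 1) ' ') = true) := by
            rcases hg with h | h | h | h
            · exact Or.inl h
            · exact Or.inr (fun hx => Bool.false_ne_true (h ▸ hx))
            · omega
            · rw [ha] at h; exact absurd h (by decide)
          have hji : i < bRunEnd cs i := bRunEnd_gt cs i him ha
          have hjle : bRunEnd cs i ≤ cs.length := bRunEnd_le cs i (by omega)
          have hstop := bRunEnd_stop cs i (by omega)
          have hgj : GoodB cs (bRunEnd cs i) := by
            rcases hstop with h | h
            · right; right; left; omega
            · right; right; right; exact h
          rw [bLoop.eq_def]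
          simp only [dif_pos him, if_neg hq, if_pos ha]
          rw [aLoop.eq_def]
          simp only [dif_pos him, if_neg hq]
          by_cases ht : (cs.drop i).take (bRunEnd cs i - i) = "true".toList
          · have hj4 : bRunEnd cs i = i + 4 := by
              have := slice_len cs i (bRunEnd cs i - i) _ ht
              simp at this; omega
            rw [if_pos (show (cs.drop i).take 4 = "true".toList ∧ _ ∧ _ from
              ⟨by rw [show (4 : Nat) = bRunEnd cs i - i by omega]; exact ht, hprev,
               by rw [← hj4]; rcases hstop with h | h
                  · left; omega
                  · right; exact fun hx => Bool.false_ne_true (h ▸ hx)⟩)]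
            rw [ih (i + 4) _ (by omega) (by omega) (by rw [← hj4]; exact hgj)]
            rw [keyMap, if_pos ht, hj4]
          · by_cases hf : (cs.drop i).take (bRunEnd cs i - i) = "false".toList
            · have hj5 : bRunEnd cs i = i + 5 := by
                have := slice_len cs i (bRunEnd cs i - i) _ hf
                simp at this; omega
              have hnt : ¬((cs.drop i).take 4 = "true".toList ∧
                  (i = 0 ∨ ¬(pyIsAlnum (cs.getD (i - 1) ' ') = true)) ∧
                  (i + 4 = cs.length ∨ ¬(pyIsAlnum (cs.getD (i + 4) ' ') = true))) := by
                rintro ⟨hA, -, hB⟩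
                have hr := kw_run cs i "true".toList (by decide)
                  (by decide) hA hB
                have hr4 : bRunEnd cs i = i + 4 := by simpa using hr
                omega
              rw [if_neg hnt]
              rw [if_pos (show (cs.drop i).take 5 = "false".toList ∧ _ ∧ _ from
                ⟨by rw [show (5 : Nat) = bRunEnd cs i - i by omega]; exact hf, hprev,
                 by rw [← hj5]; rcases hstop with h | h
                    · left; omega
                    · right; exact fun hx => Bool.false_ne_true (h ▸ hx)⟩)]
              rw [ih (i + 5) _ (by omega) (by omega) (by rw [← hj5]; exact hgj)]
              rw [keyMap, if_neg ht, if_pos hf, hj5]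
            · by_cases hnl : (cs.drop i).take (bRunEnd cs i - i) = "null".toList
              · have hj4 : bRunEnd cs i = i + 4 := by
                  have := slice_len cs i (bRunEnd cs i - i) _ hnl
                  simp at this; omega
                have hnt : ¬((cs.drop i).take 4 = "true".toList ∧
                    (i = 0 ∨ ¬(pyIsAlnum (cs.getD (i - 1) ' ') = true)) ∧
                    (i + 4 = cs.length ∨ ¬(pyIsAlnum (cs.getD (i + 4) ' ') = true))) := by
                  rintro ⟨hA, -, hB⟩
                  have hr := kw_run cs i "true".toList (by decide)
                    (by decide) hA hB
                  have hr4 : bRunEnd cs i = i + 4 := by simpa using hr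
                  rw [hr4, show i + 4 - i = 4 by omega, hA] at hnl
                  exact absurd hnl (by decide)
                have hnf : ¬((cs.drop i).take 5 = "false".toList ∧
                    (i = 0 ∨ ¬(pyIsAlnum (cs.getD (i - 1) ' ') = true)) ∧
                    (i + 5 = cs.length ∨ ¬(pyIsAlnum (cs.getD (i + 5) ' ') = true))) := by
                  rintro ⟨hA, -, hB⟩
                  have hr := kw_run cs i "false".toList (by decide)
                    (by decide) hA hB
                  have hr5 : bRunEnd cs i = i + 5 := by simpa using hr
                  omega
                rw [if_neg hnt, if_neg hnf]
                rw [if_pos (show (cs.drop i).take 4 = "null".toList ∧ _ ∧ _ from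
                  ⟨by rw [show (4 : Nat) = bRunEnd cs i - i by omega]; exact hnl, hprev,
                   by rw [← hj4]; rcases hstop with h | h
                      · left; omega
                      · right; exact fun hx => Bool.false_ne_true (h ▸ hx)⟩)]
                rw [ih (i + 4) _ (by omega) (by omega) (by rw [← hj4]; exact hgj)]
                rw [keyMap, if_neg ht, if_neg hf, if_pos hnl, hj4]
              · -- the run is not a keyword: A copies it character by character
                have hnt : ¬((cs.drop i).take 4 = "true".toList ∧
                    (i = 0 ∨ ¬(pyIsAlnum (cs.getD (i - 1) ' ') = true)) ∧
                    (i + 4 = cs.length ∨ ¬(pyIsAlnum (cs.getD (i + 4) ' ') = true))) := by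
                  rintro ⟨hA, -, hB⟩
                  have hr := kw_run cs i "true".toList (by decide)
                    (by decide) hA hB
                  have hr4 : bRunEnd cs i = i + 4 := by simpa using hr
                  apply ht
                  rw [hr4, show i + 4 - i = 4 by omega]
                  exact hA
                have hnf : ¬((cs.drop i).take 5 = "false".toList ∧
                    (i = 0 ∨ ¬(pyIsAlnum (cs.getD (i - 1) ' ') = true)) ∧
                    (i + 5 = cs.length ∨ ¬(pyIsAlnum (cs.getD (i + 5) ' ') = true))) := by
                  rintro ⟨hA, -, hB⟩
                  have hr := kw_run cs i "false".toList (by decide)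
                    (by decide) hA hB
                  have hr5 : bRunEnd cs i = i + 5 := by simpa using hr
                  apply hf
                  rw [hr5, show i + 5 - i = 5 by omega]
                  exact hA
                have hnn : ¬((cs.drop i).take 4 = "null".toList ∧
                    (i = 0 ∨ ¬(pyIsAlnum (cs.getD (i - 1) ' ') = true)) ∧
                    (i + 4 = cs.length ∨ ¬(pyIsAlnum (cs.getD (i + 4) ' ') = true))) := by
                  rintro ⟨hA, -, hB⟩
                  have hr := kw_run cs i "null".toList (by decide)
                    (by decide) hA hB
                  have hr4 : bRunEnd cs i = i + 4 := by simpa using hr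
                  apply hnl
                  rw [hr4, show i + 4 - i = 4 by omega]
                  exact hA
                rw [if_neg hnt, if_neg hnf, if_neg hnn]
                rw [copyRun cs (i + 1) (by omega) (by simpa using ha)]
                rw [show bRunEnd cs (i + 1) = bRunEnd cs i from (bRunEnd_succ cs i him ha).symm]
                rw [ih (bRunEnd cs i) _ (by omega) hjle hgj]
                rw [keyMap, if_neg ht, if_neg hf, if_neg hnl]
                rw [slice_cons cs i (bRunEnd cs i) him hji]
                congr 1
                simp
        · -- ordinary character: both copy it
          have hnt : ¬((cs.drop i).take 4 = "true".toList ∧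
              (i = 0 ∨ ¬(pyIsAlnum (cs.getD (i - 1) ' ') = true)) ∧
              (i + 4 = cs.length ∨ ¬(pyIsAlnum (cs.getD (i + 4) ' ') = true))) := by
            rintro ⟨hA, -, -⟩
            have h := slice_getD cs i 4 0 _ ' ' hA (by decide)
            rw [Nat.add_zero] at h
            exact ha (by rw [h]; decide)
          have hnf : ¬((cs.drop i).take 5 = "false".toList ∧
              (i = 0 ∨ ¬(pyIsAlnum (cs.getD (i - 1) ' ') = true)) ∧
              (i + 5 = cs.length ∨ ¬(pyIsAlnum (cs.getD (i + 5) ' ') = true))) := by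
            rintro ⟨hA, -, -⟩
            have h := slice_getD cs i 5 0 _ ' ' hA (by decide)
            rw [Nat.add_zero] at h
            exact ha (by rw [h]; decide)
          have hnn : ¬((cs.drop i).take 4 = "null".toList ∧
              (i = 0 ∨ ¬(pyIsAlnum (cs.getD (i - 1) ' ') = true)) ∧
              (i + 4 = cs.length ∨ ¬(pyIsAlnum (cs.getD (i + 4) ' ') = true))) := by
            rintro ⟨hA, -, -⟩
            have h := slice_getD cs i 4 0 _ ' ' hA (by decide)
            rw [Nat.add_zero] at h
            exact ha (by rw [h]; decide)
          rw [aLoop.eq_def]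
          simp only [dif_pos him, if_neg hq]
          rw [if_neg hnt, if_neg hnf, if_neg hnn]
          rw [bLoop.eq_def]
          simp only [dif_pos him, if_neg hq, if_neg ha]
          exact ih (i + 1) _ (by omega) (by omega) (Or.inr (Or.inl (by simpa using ha)))
    · rw [aLoop.eq_def]
      simp only [dif_neg him]
      rw [bLoop.eq_def]
      simp only [dif_neg him]

-- ===== VERDICT (by name: the statement is the Claim_ definition above) =====
theorem replace_words_outside_strings_py_spec : Claim_equal_replace_words_outside_strings_py := by
  intro line _
  show String.mk _ = String.mk _
  exact congrArg String.mk
    (mainL line.toList line.toList.length 0 [] (by omega) (by omega) (Or.inl rfl))
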